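-- pv_equiv track=rewrite | github.com/Ragusaen/allsynth_persimmon_repr | allsynth/topology.py | gen_confluent
-- ===== SOURCE A (Python) =====
-- def gen_confluent(num_copies):
--     assert num_copies >= 1
--
--     p1 = [0,1,2,3,4]
--     p2 = [0,3,2,1,4]
--
--     for i in range(num_copies-1):
--         p1_add = [max(p1)+1+p1[n] for n in range(4)]
--         p2_add = [max(p1_add)-1, max(p1_add)-2, max(p1_add)-3,max(p1_add)]
--
--         p1 = p1 + p1_add
--         p2 = p2 + p2_add
--
--     return p1, p2
-- ===== SOURCE B (Python) =====
-- def gen_confluent(num_copies):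
--     assert num_copies >= 1
--     # closed form: p1 is simply 0..4*num_copies; p2 grows by a fixed 4-block per copy
--     p1 = list(range(4 * num_copies + 1))
--     p2 = [0, 3, 2, 1, 4]
--     for k in range(1, num_copies):
--         b = 4 * k
--         p2.extend((b + 3, b + 2, b + 1, b + 4))
--     return p1, p2
-- ===== Notes on version B (the rewrite author's own statement) =====
-- stated objective: faster
-- what changed: Replaced the loop that rescans p1 with max() and indexing each iteration by a closed form for p1 (range(4*num_copies+1)) and a single pass appending each fixed 4-block to p2 from the running offset 4*k.
import Mathlib
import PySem

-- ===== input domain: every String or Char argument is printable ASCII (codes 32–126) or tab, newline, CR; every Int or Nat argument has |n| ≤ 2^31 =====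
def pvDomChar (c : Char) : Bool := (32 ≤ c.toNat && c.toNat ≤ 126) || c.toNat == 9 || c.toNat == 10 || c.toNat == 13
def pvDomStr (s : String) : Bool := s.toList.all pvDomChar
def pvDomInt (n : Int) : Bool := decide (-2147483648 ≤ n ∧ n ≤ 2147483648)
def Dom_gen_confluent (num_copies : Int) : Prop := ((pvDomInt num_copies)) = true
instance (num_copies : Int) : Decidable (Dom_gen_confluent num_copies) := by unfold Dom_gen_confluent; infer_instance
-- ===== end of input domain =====

-- B replaces A's per-iteration rescans of p1 (max() and indexing) by a closed form for p1 and
-- a single pass appending one fixed 4-block per copy to p2 (objective: faster, O(n) vs O(n^2)).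

-- ===== PORT A =====
-- loop body of A's for-loop; p1 is always nonempty and p1[n] (n in 0..3) always in range,
-- so .getD 0 after max?/pyGetD is exact here
def genCStep (st : List Int × List Int) (_i : Int) : List Int × List Int :=
  let p1 := st.1
  let p2 := st.2
  let p1_add := (PySem.List.pyRange 0 4 1).map
    (fun n => ((PySem.List.max? p1 (fun y => y)).getD 0) + 1 + PySem.List.pyGetD p1 n 0)
  let p2_add := [((PySem.List.max? p1_add (fun y => y)).getD 0) - 1,
                 ((PySem.List.max? p1_add (fun y => y)).getD 0) - 2,
                 ((PySem.List.max? p1_add (fun y => y)).getD 0) - 3,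
                 ((PySem.List.max? p1_add (fun y => y)).getD 0)]
  (p1 ++ p1_add, p2 ++ p2_add)

def gen_confluent (num_copies : Int) : List Int × List Int :=
  (PySem.List.pyRange 0 (num_copies - 1) 1).foldl genCStep ([0,1,2,3,4], [0,3,2,1,4])

-- ===== PORT B =====
def genCAltStep (p2 : List Int) (k : Int) : List Int :=
  p2 ++ [4*k + 3, 4*k + 2, 4*k + 1, 4*k + 4]

def gen_confluent_alt (num_copies : Int) : List Int × List Int :=
  let p1 := PySem.List.pyRange 0 (4 * num_copies + 1) 1
  let p2 := (PySem.List.pyRange 1 num_copies 1).foldl genCAltStep [0,3,2,1,4]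
  (p1, p2)

-- ===== PRECONDITION & SPEC =====
-- A's assert raises for num_copies < 1
def Pre_gen_confluent (num_copies : Int) : Prop := 1 ≤ num_copies
instance (num_copies : Int) : Decidable (Pre_gen_confluent num_copies) := by unfold Pre_gen_confluent; infer_instance
def pvWitness_gen_confluent : Int := 2

def Spec_gen_confluent (num_copies : Int) (out : List Int × List Int) : Prop := out = gen_confluent_alt num_copies
instance (num_copies : Int) (out : List Int × List Int) : Decidable (Spec_gen_confluent num_copies out) := by unfold Spec_gen_confluent; infer_instance

-- ===== CLAIM (what is proved, stated in full; the proofs are below) =====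
def Claim_equal_gen_confluent : Prop := ∀ (num_copies : Int), Dom_gen_confluent num_copies → Pre_gen_confluent num_copies → Spec_gen_confluent num_copies (gen_confluent num_copies)

-- ===== LEMMAS AND PROOFS =====

lemma max_pyRange_zero (m : Int) (hm : 1 ≤ m) :
    PySem.List.max? (PySem.List.pyRange 0 m 1) (fun y => y) = some (m - 1) := by
  cases h : PySem.List.max? (PySem.List.pyRange 0 m 1) (fun y => y) with
  | none =>
      rw [PySem.List.max?_eq_none_iff] at h
      have hlen := congrArg List.length h
      rw [PySem.List.length_pyRange_one] at hlen
      simp at hlen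
      omega
  | some x =>
      have hx := PySem.List.max?_mem h
      have hmax := PySem.List.max?_isMax h
      rw [PySem.List.mem_pyRange_one] at hx
      have h1 : m - 1 ≤ x := hmax (m - 1) (by rw [PySem.List.mem_pyRange_one]; omega)
      congr 1
      omega

lemma pyGetD_pyRange_zero (m n : Int) (h0 : 0 ≤ n) (h : n < m) :
    PySem.List.pyGetD (PySem.List.pyRange 0 m 1) n 0 = n := by
  have := PySem.List.pyGetD_map_pyRange_of_nonneg (fun x => x) m n 0 h0 h
  simpa using this

lemma pyRange_zero_add_four (m : Int) (hm : 0 ≤ m) :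
    PySem.List.pyRange 0 (m + 4) 1 = PySem.List.pyRange 0 m 1 ++ [m, m + 1, m + 2, m + 3] := by
  rw [PySem.List.pyRange_one_append 0 m (m + 4) hm (by omega)]
  rw [PySem.List.pyRange_one_cons (by omega : m < m + 4),
      PySem.List.pyRange_one_cons (by omega : m + 1 < m + 4),
      show m + 1 + 1 = m + 2 from by ring,
      PySem.List.pyRange_one_cons (by omega : m + 2 < m + 4),
      show m + 2 + 1 = m + 3 from by ring,
      PySem.List.pyRange_one_cons (by omega : m + 3 < m + 4),
      show m + 3 + 1 = m + 4 from by ring,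
      PySem.List.pyRange_one_eq_nil (by omega : m + 4 ≤ m + 4)]

lemma genCStep_eq (m : Int) (hm : 5 ≤ m) (q : List Int) (i : Int) :
    genCStep (PySem.List.pyRange 0 m 1, q) i
      = (PySem.List.pyRange 0 (m + 4) 1, q ++ [m + 2, m + 1, m, m + 3]) := by
  unfold genCStep
  simp only [max_pyRange_zero m (by omega)]
  have hr4 : PySem.List.pyRange 0 4 1 = [0, 1, 2, 3] := by decide
  rw [hr4]
  simp only [List.map_cons, List.map_nil,
    pyGetD_pyRange_zero m 0 (by omega) (by omega),
    pyGetD_pyRange_zero m 1 (by omega) (by omega),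
    pyGetD_pyRange_zero m 2 (by omega) (by omega),
    pyGetD_pyRange_zero m 3 (by omega) (by omega)]
  rw [PySem.List.max?_id_cons]
  simp only [List.foldl, Option.getD_some]
  rw [pyRange_zero_add_four m (by omega)]
  simp only [Prod.mk.injEq, List.append_right_inj, List.cons.injEq, and_true]
  omega

lemma loopA (j : Nat) :
    (PySem.List.pyRange 0 (j : Int) 1).foldl genCStep ([0,1,2,3,4], [0,3,2,1,4])
      = (PySem.List.pyRange 0 (4 * (j : Int) + 5) 1,
         (PySem.List.pyRange 1 ((j : Int) + 1) 1).foldl genCAltStep [0,3,2,1,4]) := by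
  induction j with
  | zero => decide
  | succ j ih =>
      have hc : ((j + 1 : Nat) : Int) = (j : Int) + 1 := by push_cast; ring
      rw [hc]
      rw [PySem.List.pyRange_one_succ_right (by positivity : (0:Int) ≤ (j:Int)),
          List.foldl_append, ih]
      simp only [List.foldl_cons, List.foldl_nil]
      rw [genCStep_eq (4 * (j:Int) + 5) (by omega) _ (j:Int)]
      rw [show (4 * (j:Int) + 5) + 4 = 4 * ((j:Int) + 1) + 5 by ring]
      rw [show ((j:Int) + 1) + 1 = ((j:Int) + 1) + 1 from rfl]
      rw [PySem.List.pyRange_one_succ_right (by omega : (1:Int) ≤ (j:Int) + 1),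
          List.foldl_append]
      simp only [List.foldl]
      unfold genCAltStep
      simp only [Prod.mk.injEq, List.append_right_inj, List.cons.injEq, and_true, true_and]
      omega

-- ===== VERDICT (by name: the statement is the Claim_ definition above) =====
theorem gen_confluent_spec : Claim_equal_gen_confluent := by
  intro n _ hpre
  have hn : (1:Int) ≤ n := hpre
  unfold Spec_gen_confluent gen_confluent gen_confluent_alt
  have hj : n - 1 = ((n - 1).toNat : Int) := by omega
  rw [hj, loopA (n - 1).toNat]
  have h1 : 4 * (((n - 1).toNat : Int)) + 5 = 4 * n + 1 := by omega
  have h2 : (((n - 1).toNat : Int)) + 1 = n := by omega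
  rw [h1, h2]
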